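-- pv_equiv track=rewrite | github.com/elquad/aoc2014 | src/day05/solution.py | get_correct_seqs_mids
-- ===== SOURCE A (Python) =====
-- def validate_seq(rules: dict[int, set[int]], seq: list[int]) -> bool:
--     """True if numbers in seq are ordered by the precedence rules."""
--     for idx, num in enumerate(seq):
--         ruleset = rules.get(num, None)
--         if ruleset is not None:
--             for num in ruleset:
--                 if num in seq and seq.index(num) < idx:
--                     return False
--     return True
--
-- def get_correct_seqs_mids(
--         rules: dict[int, set[int]],
--         sequences: list[list[int]]
--         ) -> list[int]:
--     """Validate the list of all sequences, return their midpoints."""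
--     mids = []
--     for seq in sequences:
--         if validate_seq(rules, seq):
--             mids.append(seq[(len(seq) - 1) // 2])
--     return mids
-- ===== SOURCE B (Python) =====
-- def get_correct_seqs_mids(
--         rules: dict[int, set[int]],
--         sequences: list[list[int]]
--         ) -> list[int]:
--     """Validate the list of all sequences, return their midpoints."""
--     mids = []
--     for seq in sequences:
--         seen = set()
--         ok = True
--         for num in seq:
--             if rules.get(num, set()) & seen:
--                 ok = False
--                 break
--             seen.add(num)
--         if ok:
--             mids.append(seq[(len(seq) - 1) // 2])
--     return mids
-- ===== Notes on version B (the rewrite author's own statement) =====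
-- stated objective: idiomatic
-- what changed: validate_seq's nested scan (for each element, for each rule successor, a whole-list membership test plus a seq.index scan) is replaced by a single forward pass that maintains a running 'seen' set and rejects when rules.get(num, set()) intersects it; the midpoint collection is unchanged.
import Mathlib
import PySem

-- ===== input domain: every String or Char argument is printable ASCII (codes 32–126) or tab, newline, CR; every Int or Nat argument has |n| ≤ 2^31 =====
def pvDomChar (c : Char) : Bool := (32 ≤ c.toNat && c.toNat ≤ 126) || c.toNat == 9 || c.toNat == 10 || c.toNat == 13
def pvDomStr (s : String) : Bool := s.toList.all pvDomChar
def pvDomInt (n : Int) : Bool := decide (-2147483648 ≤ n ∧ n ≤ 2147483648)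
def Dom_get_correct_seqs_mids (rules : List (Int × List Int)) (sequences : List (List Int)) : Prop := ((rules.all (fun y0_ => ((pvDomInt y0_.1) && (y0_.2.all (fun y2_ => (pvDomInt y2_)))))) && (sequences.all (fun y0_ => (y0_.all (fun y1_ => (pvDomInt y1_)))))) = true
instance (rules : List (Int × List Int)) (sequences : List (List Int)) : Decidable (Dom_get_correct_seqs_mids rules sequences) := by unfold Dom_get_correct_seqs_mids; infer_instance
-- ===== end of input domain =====

-- B replaces validate_seq's repeated whole-list seq.index scans by one forward pass over seq
-- maintaining a running 'seen' set (idiomatic single-pass rewrite; same return value).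
-- rules.get(k): association-list lookup, first match (shared by both ports)
def pvDictGet? (rules : List (Int × List Int)) (k : Int) : Option (List Int) :=
  (rules.find? (fun p => p.1 == k)).map (·.2)

-- ===== PORT A =====
-- A's validate_seq: for idx, num in enumerate(seq): for m in rules.get(num): if m in seq and seq.index(m) < idx: return False
def pvValidateA (rules : List (Int × List Int)) (seq : List Int) : Bool :=
  (PySem.List.enumerate seq 0).all (fun p =>
    match pvDictGet? rules p.2 with
    | none => true
    | some ruleset =>
        ruleset.all (fun m =>
          !(decide (m ∈ seq) && decide ((((PySem.List.index? seq m).getD 0 : Nat) : Int) < p.1))))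

def get_correct_seqs_mids (rules : List (Int × List Int)) (sequences : List (List Int)) : List Int :=
  sequences.foldl (fun mids seq =>
    if pvValidateA rules seq then
      -- seq[(len(seq)-1)//2]; pyGet? = none only on seq = [], which Pre_ excludes
      mids ++ [(PySem.List.pyGet? seq (PySem.Int.floordiv ((seq.length : Int) - 1) 2)).getD 0]
    else mids) []

-- ===== PORT B =====
-- B's inner loop: for num in seq: if rules.get(num, set()) & seen: break; seen.add(num)
def pvValidateB (rules : List (Int × List Int)) (seen : PySem.Set Int) : List Int → Bool
  | [] => true
  | num :: rest =>
      if PySem.Set.inter ((pvDictGet? rules num).getD []) seen ≠ [] then false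
      else pvValidateB rules (PySem.Set.add seen num) rest

def get_correct_seqs_mids_alt (rules : List (Int × List Int)) (sequences : List (List Int)) : List Int :=
  sequences.foldl (fun mids seq =>
    if pvValidateB rules [] seq then
      mids ++ [(PySem.List.pyGet? seq (PySem.Int.floordiv ((seq.length : Int) - 1) 2)).getD 0]
    else mids) []

-- ===== PRECONDITION & SPEC =====
-- Pre_ excludes an empty sequence among the inputs: there A (and B) raise IndexError on seq[-1].
def Pre_get_correct_seqs_mids (rules : List (Int × List Int)) (sequences : List (List Int)) : Prop :=
  ∀ s ∈ sequences, s ≠ []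
instance (rules : List (Int × List Int)) (sequences : List (List Int)) : Decidable (Pre_get_correct_seqs_mids rules sequences) := by unfold Pre_get_correct_seqs_mids; infer_instance

def pvWitness_get_correct_seqs_mids : (List (Int × List Int)) × List (List Int) :=
  ([(2, [1]), (5, [3])], [[1, 2, 3], [2, 1, 3], [3, 5], [5, 3, 4, 6]])

def Spec_get_correct_seqs_mids (rules : List (Int × List Int)) (sequences : List (List Int)) (out : List Int) : Prop := out = get_correct_seqs_mids_alt rules sequences
instance (rules : List (Int × List Int)) (sequences : List (List Int)) (out : List Int) : Decidable (Spec_get_correct_seqs_mids rules sequences out) := by unfold Spec_get_correct_seqs_mids; infer_instance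

-- ===== CLAIM (what is proved, stated in full; the proofs are below) =====
def Claim_equal_get_correct_seqs_mids : Prop := ∀ (rules : List (Int × List Int)) (sequences : List (List Int)), Dom_get_correct_seqs_mids rules sequences → Pre_get_correct_seqs_mids rules sequences → Spec_get_correct_seqs_mids rules sequences (get_correct_seqs_mids rules sequences)

-- ===== LEMMAS AND PROOFS =====

-- the ruleset Python's rules.get(num, …) yields, as a plain list (empty when the key is absent)
def pvRS (rules : List (Int × List Int)) (x : Int) : List Int := (pvDictGet? rules x).getD []

-- idxOf? is 'some idxOf' on members
lemma pvIdxOf?_of_mem (l : List Int) (m : Int) (h : m ∈ l) :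
    List.idxOf? m l = some (List.idxOf m l) := by
  induction l with
  | nil => simp at h
  | cons a t ih =>
      by_cases hme : a = m
      · subst hme; simp [List.idxOf?_cons]
      · rcases List.mem_cons.mp h with rfl | ht
        · exact absurd rfl hme
        · simp [List.idxOf?_cons, hme, ih ht]

-- A's inner test for position k: 'm in seq and seq.index(m) < k' is exactly 'm ∈ seq.take k'
lemma pvA_inner (seq : List Int) (m : Int) (k : Nat) :
    (m ∈ seq ∧ (((PySem.List.index? seq m).getD 0 : Nat) : Int) < (k : Int)) ↔ m ∈ seq.take k := by
  constructor
  · rintro ⟨hm, hlt⟩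
    rw [List.mem_take_iff_idxOf_lt hm]
    have : (PySem.List.index? seq m).getD 0 = seq.idxOf m := by
      rw [PySem.List.index?_eq_idxOf?, pvIdxOf?_of_mem seq m hm, Option.getD_some]
    rw [this] at hlt
    have hlen := List.idxOf_lt_length_of_mem hm
    omega
  · intro h
    have hm : m ∈ seq := List.mem_of_mem_take h
    rw [List.mem_take_iff_idxOf_lt hm] at h
    refine ⟨hm, ?_⟩
    rw [PySem.List.index?_eq_idxOf?, pvIdxOf?_of_mem seq m hm, Option.getD_some]
    omega

-- characterisation of A's validate_seq
lemma pvA_iff (rules : List (Int × List Int)) (seq : List Int) :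
    pvValidateA rules seq = true ↔
      ∀ (k : Nat) (hk : k < seq.length), ∀ m ∈ pvRS rules seq[k], m ∉ seq.take k := by
  unfold pvValidateA
  rw [List.all_eq_true]
  constructor
  · intro h k hk m hm hmem
    have hp := h ((0 : Int) + k, seq[k]) (by
      rw [PySem.List.mem_enumerate_iff]; exact ⟨k, hk, rfl⟩)
    dsimp only at hp
    cases hd : pvDictGet? rules seq[k] with
    | none => simp [pvRS, hd] at hm
    | some rs =>
        rw [hd] at hp
        rw [List.all_eq_true] at hp
        have h2 := hp m (by simpa [pvRS, hd] using hm)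
        have h3 := (pvA_inner seq m k).mpr hmem
        simp only [Bool.not_eq_eq_eq_not, Bool.not_true, Bool.and_eq_false_iff,
          decide_eq_false_iff_not] at h2
        rcases h2 with h2 | h2
        · exact h2 h3.1
        · apply h2; rw [zero_add]; exact h3.2
  · intro h p hp
    rw [PySem.List.mem_enumerate_iff] at hp
    obtain ⟨k, hk, rfl⟩ := hp
    dsimp only
    cases hd : pvDictGet? rules seq[k] with
    | none => rfl
    | some rs =>
        rw [List.all_eq_true]
        intro m hm
        have hnot : m ∉ seq.take k := h k hk m (by simp [pvRS, hd]; exact hm)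
        simp only [Bool.not_eq_eq_eq_not, Bool.not_true, Bool.and_eq_false_iff,
          decide_eq_false_iff_not]
        by_cases hms : m ∈ seq
        · right
          intro hlt
          exact hnot ((pvA_inner seq m k).mp ⟨hms, by rwa [zero_add] at hlt⟩)
        · left; exact hms

-- characterisation of B's loop, with the running 'seen' set generalised
lemma pvB_iff (rules : List (Int × List Int)) (seen : PySem.Set Int) (l : List Int) :
    pvValidateB rules seen l = true ↔
      ∀ (k : Nat) (hk : k < l.length), ∀ m ∈ pvRS rules l[k], ¬(m ∈ seen ∨ m ∈ l.take k) := by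
  induction l generalizing seen with
  | nil => simp [pvValidateB]
  | cons num rest ih =>
      rw [pvValidateB]
      by_cases hc : PySem.Set.inter ((pvDictGet? rules num).getD []) seen ≠ []
      · rw [if_pos hc]
        simp only [Bool.false_eq_true, false_iff, not_forall]
        obtain ⟨m, hmi⟩ := List.exists_mem_of_ne_nil _ hc
        rw [PySem.Set.mem_inter] at hmi
        exact ⟨0, by simp, m, by simpa [pvRS] using hmi.1, by simp [hmi.2]⟩
      · rw [if_neg hc]
        rw [ih]
        push_neg at hc
        have hfst : ∀ m ∈ pvRS rules num, m ∉ seen := by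
          intro m hm hms
          have : m ∈ PySem.Set.inter ((pvDictGet? rules num).getD []) seen := by
            rw [PySem.Set.mem_inter]; exact ⟨by simpa [pvRS] using hm, hms⟩
          simp [hc] at this
        constructor
        · intro h k hk m hm hmem
          match k, hk with
          | 0, _ =>
              simp only [List.take_zero, List.not_mem_nil, or_false] at hmem
              exact hfst m (by simpa using hm) hmem
          | (j+1), hk =>
              have := h j (by simpa using Nat.lt_of_succ_lt_succ hk) m (by simpa using hm)
              apply this
              simp only [List.take_succ_cons, List.mem_cons] at hmem
              rcases hmem with hms | hms
              · left; rw [PySem.Set.mem_add]; left; exact hms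
              · rcases hms with rfl | hms
                · left; rw [PySem.Set.mem_add]; right; rfl
                · right; exact hms
        · intro h j hj m hm hmem
          have := h (j+1) (by simpa using Nat.succ_lt_succ hj) m (by simpa using hm)
          apply this
          rcases hmem with hms | hms
          · rw [PySem.Set.mem_add] at hms
            rcases hms with hms | rfl
            · left; exact hms
            · right; simp [List.take_succ_cons]
          · right; simp [List.take_succ_cons, hms]

lemma pvValid_eq (rules : List (Int × List Int)) (seq : List Int) :
    pvValidateA rules seq = pvValidateB rules [] seq := by
  have hA := pvA_iff rules seq
  have hB := pvB_iff rules [] seq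
  have : pvValidateA rules seq = true ↔ pvValidateB rules [] seq = true := by
    rw [hA, hB]
    constructor
    · intro h k hk m hm
      simp only [List.not_mem_nil, false_or]
      exact h k hk m hm
    · intro h k hk m hm hmem
      exact h k hk m hm (Or.inr hmem)
  cases hx : pvValidateA rules seq <;> cases hy : pvValidateB rules [] seq <;> simp_all

-- ===== VERDICT (by name: the statement is the Claim_ definition above) =====
theorem get_correct_seqs_mids_spec : Claim_equal_get_correct_seqs_mids := by
  intro rules sequences _ _
  unfold Spec_get_correct_seqs_mids get_correct_seqs_mids get_correct_seqs_mids_alt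
  have h : (fun (mids : List Int) (seq : List Int) =>
      if pvValidateA rules seq then
        mids ++ [(PySem.List.pyGet? seq (PySem.Int.floordiv ((seq.length : Int) - 1) 2)).getD 0]
      else mids)
    = (fun (mids : List Int) (seq : List Int) =>
      if pvValidateB rules [] seq then
        mids ++ [(PySem.List.pyGet? seq (PySem.Int.floordiv ((seq.length : Int) - 1) 2)).getD 0]
      else mids) := by
    funext mids seq; rw [pvValid_eq]
  rw [h]
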